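-- pv_equiv track=rewrite | github.com/Nghia03092004/nghia03092004.github.io | project_euler/problem_523/solution.py | simulate_first_sort
-- ===== SOURCE A (Python) =====
-- def simulate_first_sort(perm: list):
--     """
--     Simulate the first-sort algorithm on a permutation.
--     Repeatedly find the first element > its successor, remove it,
--     and reinsert it at the correct position.
--     Return the number of moves.
--     """
--     arr = list(perm)
--     moves = 0
--     while True:
--         found = -1
--         for i in range(len(arr) - 1):
--             if arr[i] > arr[i + 1]:
--                 found = i
--                 break
--         if found == -1:
--             break
--         elem = arr.pop(found)
--         inserted = False
--         for j in range(len(arr)):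
--             if elem <= arr[j]:
--                 arr.insert(j, elem)
--                 inserted = True
--                 break
--         if not inserted:
--             arr.append(elem)
--         moves += 1
--     return moves
-- ===== SOURCE B (Python) =====
-- def simulate_first_sort(perm: list):
--     """
--     Closed form for the first-sort move count: each element is moved exactly
--     once per maximal run of strictly smaller elements to its right, so count
--     those runs directly in one quadratic pass instead of simulating the loop.
--     """
--     moves = 0
--     suffix = list(perm)
--     while suffix:
--         x = suffix[0]
--         suffix = suffix[1:]
--         prev = x  # sentinel: a new run needs the previous element to be >= x
--         for y in suffix:
--             if y < x and prev >= x: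
--                 moves += 1
--             prev = y
--     return moves
-- ===== Notes on version B (the rewrite author's own statement) =====
-- stated objective: alternative
-- what changed: Replaces the while-loop simulation (find first descent, pop, rescan to reinsert) by a direct closed-form count: each element contributes one move per maximal run of strictly smaller elements to its right, computed in one quadratic double pass; Pre_ excludes exactly the inputs on which A never returns (it loops forever when some value occurs twice with a strictly smaller value after the second occurrence).
import Mathlib
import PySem

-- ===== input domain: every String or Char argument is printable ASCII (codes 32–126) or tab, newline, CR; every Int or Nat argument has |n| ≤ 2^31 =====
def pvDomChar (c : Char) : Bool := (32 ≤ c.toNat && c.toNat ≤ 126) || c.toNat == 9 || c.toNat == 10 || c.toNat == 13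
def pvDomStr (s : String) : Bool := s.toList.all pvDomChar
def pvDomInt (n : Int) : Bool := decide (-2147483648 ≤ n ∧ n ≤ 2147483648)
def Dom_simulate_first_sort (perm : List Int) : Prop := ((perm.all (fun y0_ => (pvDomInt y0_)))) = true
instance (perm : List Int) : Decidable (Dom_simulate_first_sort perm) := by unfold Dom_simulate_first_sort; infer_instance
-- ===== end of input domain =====

-- B is a closed-form count (one move per maximal run of strictly smaller elements to an
-- element's right) replacing A's while-loop simulation; proved equal wherever A terminates.

-- ===== PORT A =====
-- 'for i in range(len(arr)-1): if arr[i] > arr[i+1]: found = i; break' followed by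
-- 'elem = arr.pop(found)': the found index is used only for the pop, so the search and
-- the pop are transcribed together: the first-descent element and the list without it.
def pvStepFind : List Int → Option (Int × List Int)
  | x :: y :: t => if x > y then some (x, y :: t)
                   else (pvStepFind (y :: t)).map (fun p => (p.1, x :: p.2))
  | _ => none

-- 'for j in range(len(arr)): if elem <= arr[j]: arr.insert(j, elem); break' with the
-- 'if not inserted: arr.append(elem)' fallback.
def pvInsertSorted (elem : Int) : List Int → List Int
  | [] => [elem]
  | x :: t => if elem ≤ x then elem :: x :: t else x :: pvInsertSorted elem t

-- the 'while True' loop; the fuel only makes it total (under Pre_ the loop runs at most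
-- length² times, proved below, so the fuel is never exhausted).
def pvLoopA : Nat → List Int → Int → Int
  | 0, _, moves => moves
  | fuel + 1, arr, moves =>
    match pvStepFind arr with
    | none => moves
    | some (elem, rest) => pvLoopA fuel (pvInsertSorted elem rest) (moves + 1)

def simulate_first_sort (perm : List Int) : Int :=
  pvLoopA (perm.length * perm.length + 1) perm 0

-- ===== PORT B =====
-- inner 'for y in suffix' loop of Source B: prev-register run counter for threshold x
def pvInnerB (x prev : Int) : List Int → Int
  | [] => 0
  | y :: t => (if y < x ∧ x ≤ prev then 1 else 0) + pvInnerB x y t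

-- outer 'while suffix' loop of Source B
def simulate_first_sort_alt : List Int → Int
  | [] => 0
  | x :: t => pvInnerB x x t + simulate_first_sort_alt t

-- ===== PRECONDITION & SPEC =====
-- A loops forever exactly when some value occurs twice with a strictly smaller value
-- after the second occurrence; Pre_ excludes exactly those inputs (A returns on all others).
def Pre_simulate_first_sort (perm : List Int) : Prop :=
  ∀ x ∈ perm, ∀ y ∈ perm, [x, x, y].Sublist perm → x ≤ y

instance (perm : List Int) : Decidable (Pre_simulate_first_sort perm) := by
  unfold Pre_simulate_first_sort; infer_instance

def pvWitness_simulate_first_sort : List Int := [3, 1, 2]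

def Spec_simulate_first_sort (perm : List Int) (out : Int) : Prop := out = simulate_first_sort_alt perm
instance (perm : List Int) (out : Int) : Decidable (Spec_simulate_first_sort perm out) := by unfold Spec_simulate_first_sort; infer_instance

-- ===== CLAIM (what is proved, stated in full; the proofs are below) =====
def Claim_equal_simulate_first_sort : Prop := ∀ (perm : List Int), Dom_simulate_first_sort perm → Pre_simulate_first_sort perm → Spec_simulate_first_sort perm (simulate_first_sort perm)

-- ===== LEMMAS AND PROOFS =====

-- basic bounds
theorem pvInnerB_nonneg (x p : Int) (l : List Int) : 0 ≤ pvInnerB x p l := by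
  induction l generalizing p with
  | nil => simp [pvInnerB]
  | cons y t ih => simp only [pvInnerB]; have := ih y; split_ifs <;> omega

theorem pvInnerB_le_length (x p : Int) (l : List Int) : pvInnerB x p l ≤ l.length := by
  induction l generalizing p with
  | nil => simp [pvInnerB]
  | cons y t ih => simp only [pvInnerB, List.length_cons]; have := ih y; split_ifs <;> push_cast <;> omega

theorem alt_nonneg (l : List Int) : 0 ≤ simulate_first_sort_alt l := by
  induction l with
  | nil => simp [simulate_first_sort_alt]
  | cons x t ih => have := pvInnerB_nonneg x x t; simp only [simulate_first_sort_alt]; omega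

theorem alt_le_sq (l : List Int) : simulate_first_sort_alt l ≤ l.length * l.length := by
  induction l with
  | nil => simp [simulate_first_sort_alt]
  | cons x t ih =>
    have h1 := pvInnerB_le_length x x t
    simp only [simulate_first_sort_alt, List.length_cons]
    push_cast
    nlinarith [t.length.cast_nonneg (α := Int)]

-- prev only matters through whether it is ≥ the threshold
theorem pvInnerB_prev_congr (x p q : Int) (l : List Int) (h : x ≤ p ↔ x ≤ q) :
    pvInnerB x p l = pvInnerB x q l := by
  cases l with
  | nil => rfl
  | cons y t =>
    simp only [pvInnerB]
    congr 1
    split_ifs <;> tauto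

-- prev is irrelevant when the list is empty or starts with a blocker
theorem pvInnerB_prev_irrel (x p q : Int) (l : List Int)
    (h : ∀ z ∈ l.head?, x ≤ z) : pvInnerB x p l = pvInnerB x q l := by
  cases l with
  | nil => rfl
  | cons y t =>
    have hy : x ≤ y := h y rfl
    simp only [pvInnerB]
    congr 1
    have : ¬ y < x := by omega
    simp [this]

-- skipping an element ≥ the threshold does not change the count, provided the part
-- after it is empty or starts ≥ the threshold
theorem pvInnerB_skip (x e : Int) (s r : List Int) (p : Int) (he : x ≤ e)
    (hr : ∀ z ∈ r.head?, x ≤ z) :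
    pvInnerB x p (s ++ e :: r) = pvInnerB x p (s ++ r) := by
  induction s generalizing p with
  | nil =>
    simp only [List.nil_append, pvInnerB]
    have : ¬ e < x := by omega
    simp only [this, false_and, if_false, zero_add]
    exact pvInnerB_prev_irrel x e p r hr
  | cons a s' ih => simp only [List.cons_append, pvInnerB, ih]

-- moving X right past v does not change the count for a threshold t ≤ X whose
-- intervening elements are all ≥ t
theorem pvInnerB_move (t X p : Int) (s v r : List Int) (hp : t ≤ p) (hX : t ≤ X)
    (hs : ∀ z ∈ s, t ≤ z) (hr : ∀ z ∈ r.head?, X ≤ z) :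
    pvInnerB t p (s ++ X :: (v ++ r)) = pvInnerB t p (s ++ v ++ X :: r) := by
  induction s generalizing p with
  | nil =>
    simp only [List.nil_append]
    have h1 : pvInnerB t p (v ++ X :: r) = pvInnerB t p (v ++ r) := by
      refine pvInnerB_skip t X v r p hX ?_
      intro z hz; exact le_trans hX (hr z hz)
    simp only [pvInnerB]
    have : ¬ X < t := by omega
    simp only [this, false_and, if_false, zero_add, h1]
    exact pvInnerB_prev_congr t X p (v ++ r) (by constructor <;> intro <;> omega)
  | cons a s' ih =>
    have ha : t ≤ a := hs a List.mem_cons_self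
    simp only [List.cons_append, pvInnerB]
    rw [ih a ha (fun z hz => hs z (List.mem_cons_of_mem a hz))]

-- inserting X after v (all < X) adds exactly X's own contribution
theorem alt_insert (X : Int) (v r : List Int) (hv : ∀ z ∈ v, z < X)
    (hr : ∀ z ∈ r.head?, X ≤ z) :
    simulate_first_sort_alt (v ++ X :: r) = simulate_first_sort_alt (v ++ r) + pvInnerB X X r := by
  induction v with
  | nil => simp only [List.nil_append, simulate_first_sort_alt]; ring
  | cons z v' ih =>
    have hz : z < X := hv z List.mem_cons_self
    simp only [List.cons_append, simulate_first_sort_alt]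
    rw [pvInnerB_skip z X v' r z (le_of_lt hz)
      (fun w hw => le_trans (le_of_lt hz) (hr w hw)),
      ih (fun w hw => hv w (List.mem_cons_of_mem z hw))]
    ring

-- after a prev below the threshold the current run is already open: nothing new counts
-- until the first blocker, so the count equals the one with a fresh sentinel
theorem pvInnerB_run_zero (X : Int) (v r : List Int) (hv : ∀ z ∈ v, z < X)
    (hr : ∀ z ∈ r.head?, X ≤ z) :
    ∀ q : Int, ¬ X ≤ q → pvInnerB X q (v ++ r) = pvInnerB X X r := by
  induction v with
  | nil =>
    intro q _
    exact pvInnerB_prev_irrel X q X r hr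
  | cons z v' ih =>
    intro q hq
    have hz : z < X := hv z List.mem_cons_self
    simp only [List.cons_append, pvInnerB]
    have : ¬ (z < X ∧ X ≤ q) := by tauto
    simp only [this, if_false, zero_add]
    exact ih (fun w hw => hv w (List.mem_cons_of_mem z hw)) z (by omega)

-- a nonempty run of elements < X counts exactly one move for X
theorem pvInnerB_run (X p : Int) (v r : List Int) (hp : X ≤ p) (hne : v ≠ [])
    (hv : ∀ z ∈ v, z < X) (hr : ∀ z ∈ r.head?, X ≤ z) :
    pvInnerB X p (v ++ r) = 1 + pvInnerB X X r := by
  cases v with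
  | nil => exact absurd rfl hne
  | cons z v' =>
    have hz : z < X := hv z List.mem_cons_self
    simp only [List.cons_append, pvInnerB]
    have hc : z < X ∧ X ≤ p := ⟨hz, hp⟩
    simp only [if_pos hc]
    rw [pvInnerB_run_zero X v' r (fun w hw => hv w (List.mem_cons_of_mem z hw)) hr z (by omega)]

-- a list of elements ≥ the threshold counts zero
theorem pvInnerB_zero (x p : Int) (l : List Int) (h : ∀ z ∈ l, x ≤ z) : pvInnerB x p l = 0 := by
  induction l generalizing p with
  | nil => rfl
  | cons y t ih =>
    have : ¬ y < x := by have := h y List.mem_cons_self; omega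
    simp only [pvInnerB, this, false_and, if_false, zero_add]
    exact ih y (fun z hz => h z (List.mem_cons_of_mem y hz))

theorem alt_sorted (l : List Int) (h : l.IsChain (· ≤ ·)) : simulate_first_sort_alt l = 0 := by
  induction l with
  | nil => rfl
  | cons x t ih =>
    have hp : (x :: t).Pairwise (· ≤ ·) := List.isChain_iff_pairwise.mp h
    have hpw : ∀ z ∈ t, x ≤ z := (List.pairwise_cons.mp hp).1
    have ht : t.IsChain (· ≤ ·) := (List.isChain_cons.mp h).2
    simp only [simulate_first_sort_alt, pvInnerB_zero x x t hpw, ih ht, add_zero]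

-- pvStepFind characterisation
theorem pvStepFind_none (a : List Int) (h : pvStepFind a = none) : a.IsChain (· ≤ ·) := by
  induction a with
  | nil => exact List.isChain_nil
  | cons x t ih =>
    cases t with
    | nil => exact List.isChain_singleton x
    | cons y w =>
      simp only [pvStepFind] at h
      split_ifs at h with hxy
      rw [Option.map_eq_none_iff] at h
      refine List.isChain_cons.mpr ⟨?_, ih h⟩
      intro z hz
      simp only [List.head?_cons, Option.mem_def, Option.some.injEq] at hz
      omega

theorem pvStepFind_some (a : List Int) (e : Int) (rest : List Int)
    (h : pvStepFind a = some (e, rest)) :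
    ∃ u y w, a = u ++ e :: y :: w ∧ rest = u ++ y :: w ∧ y < e ∧
      (u ++ [e]).IsChain (· ≤ ·) := by
  induction a generalizing e rest with
  | nil => simp [pvStepFind] at h
  | cons x t ih =>
    cases t with
    | nil => simp [pvStepFind] at h
    | cons y w =>
      simp only [pvStepFind] at h
      split_ifs at h with hxy
      · simp only [Option.some.injEq, Prod.mk.injEq] at h
        exact ⟨[], y, w, by simp [← h.1], by simp [← h.2], by omega,
          by rw [← h.1]; exact List.isChain_singleton x⟩
      · cases hfind : pvStepFind (y :: w) with
        | none => rw [hfind] at h; simp at h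
        | some pr =>
          obtain ⟨e', rest'⟩ := pr
          rw [hfind] at h
          simp only [Option.map_some, Option.some.injEq, Prod.mk.injEq] at h
          obtain ⟨he, hr2⟩ := h
          subst he
          subst hr2
          obtain ⟨u, y', w', h1, h2, h3, h4⟩ := ih e' rest' hfind
          refine ⟨x :: u, y', w', by rw [List.cons_append, ← h1], by rw [h2, List.cons_append],
            h3, ?_⟩
          rw [List.cons_append]
          refine List.isChain_cons.mpr ⟨?_, h4⟩
          intro z hz
          cases u with
          | nil =>
            simp only [List.nil_append, List.head?_cons, Option.mem_def,
              Option.some.injEq] at hz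
            have hye : y = e' := by
              have := congrArg List.head? h1
              simp only [List.head?_cons, List.nil_append, Option.some.injEq] at this
              exact this
            subst hz
            omega
          | cons u0 u' =>
            simp only [List.cons_append, List.head?_cons, Option.mem_def,
              Option.some.injEq] at hz
            have hyu : y = u0 := by
              have := congrArg List.head? h1
              simp only [List.head?_cons, List.cons_append, Option.some.injEq] at this
              exact this
            subst hz
            omega

-- insertion is takeWhile/dropWhile surgery
theorem pvInsertSorted_eq (x : Int) (l : List Int) :
    pvInsertSorted x l = l.takeWhile (fun z => decide (z < x)) ++
      x :: l.dropWhile (fun z => decide (z < x)) := by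
  induction l with
  | nil => rfl
  | cons y t ih =>
    simp only [pvInsertSorted, List.takeWhile_cons, List.dropWhile_cons]
    by_cases h : x ≤ y
    · have : ¬ y < x := by omega
      simp [h, this]
    · have : y < x := by omega
      simp [h, this, ih]

theorem pvTakeWhile_app (P : Int → Bool) (l1 l2 : List Int) (h : ∀ z ∈ l1, P z = true) :
    (l1 ++ l2).takeWhile P = l1 ++ l2.takeWhile P := by
  induction l1 with
  | nil => rfl
  | cons a t ih =>
    simp only [List.cons_append, List.takeWhile_cons, h a List.mem_cons_self, if_true,
      ih (fun z hz => h z (List.mem_cons_of_mem a hz))]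

theorem pvDropWhile_app (P : Int → Bool) (l1 l2 : List Int) (h : ∀ z ∈ l1, P z = true) :
    (l1 ++ l2).dropWhile P = l2.dropWhile P := by
  induction l1 with
  | nil => rfl
  | cons a t ih =>
    simp only [List.cons_append, List.dropWhile_cons, h a List.mem_cons_self, if_true,
      ih (fun z hz => h z (List.mem_cons_of_mem a hz))]

-- the moved element is strictly greater than everything in the sorted prefix
theorem pre_prefix_lt (a : List Int) (u : List Int) (e y : Int) (w : List Int)
    (hpre : Pre_simulate_first_sort a) (ha : a = u ++ e :: y :: w)
    (hy : y < e) (hch : (u ++ [e]).IsChain (· ≤ ·)) : ∀ z ∈ u, z < e := by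
  intro z hz
  have hle : z ≤ e := by
    have hp := List.isChain_iff_pairwise.mp hch
    have := List.pairwise_append.mp hp
    exact this.2.2 z hz e (by simp)
  rcases lt_or_eq_of_le hle with h | h
  · exact h
  · exfalso
    subst h
    have hsub : [z, z, y].Sublist a := by
      rw [ha]
      have h1 : [z].Sublist u := List.singleton_sublist.mpr hz
      have h2 : [z, y].Sublist (z :: y :: w) := by
        refine List.Sublist.cons₂ z ?_
        exact List.singleton_sublist.mpr (by simp)
      simpa using List.Sublist.append h1 h2
    have hza : z ∈ a := hsub.mem (by simp)
    have hya : y ∈ a := hsub.mem (by simp)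
    have := hpre z hza y hya hsub
    omega

-- Pre_ is preserved by one step of the loop
theorem pre_preserved (u v r : List Int) (X : Int)
    (hpre : Pre_simulate_first_sort (u ++ X :: (v ++ r)))
    (hu : ∀ z ∈ u, z < X) (hv : ∀ z ∈ v, z < X) :
    Pre_simulate_first_sort (u ++ v ++ X :: r) := by
  intro p hp q hq hsub
  have hperm : (u ++ v ++ X :: r).Perm (u ++ X :: (v ++ r)) := by
    rw [List.append_assoc]
    exact List.Perm.append_left u List.perm_middle
  have hpa : p ∈ u ++ X :: (v ++ r) := hperm.mem_iff.mp hp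
  have hqa : q ∈ u ++ X :: (v ++ r) := hperm.mem_iff.mp hq
  rw [List.sublist_append_iff] at hsub
  obtain ⟨s1, s2, hsplit, hs1, hs2⟩ := hsub
  rcases List.sublist_cons_iff.mp hs2 with hs2r | ⟨s2b, hs2e, hs2r⟩
  · -- X unused: the pattern was already a sublist of the old list
    have h1 : [p, p, q].Sublist ((u ++ v) ++ r) := by
      rw [hsplit]; exact List.Sublist.append hs1 hs2r
    have h2 : ((u ++ v) ++ r).Sublist (u ++ X :: (v ++ r)) := by
      rw [List.append_assoc]
      exact (List.sublist_cons_self X (v ++ r)).append_left u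
    exact hpre p hpa q hqa (h1.trans h2)
  · subst hs2e
    -- [p, p, q] = s1 ++ X :: s2b : case on where X sits
    cases s1 with
    | nil =>
      -- p = X, s2b = [p, q] <+ r
      simp only [List.nil_append, List.cons.injEq] at hsplit
      obtain ⟨hpX, hrest⟩ := hsplit
      subst hpX
      have hsub' : [p, p, q].Sublist (u ++ p :: (v ++ r)) := by
        have hbody : [p, p, q].Sublist (p :: (v ++ r)) :=
          List.Sublist.cons₂ p ((hrest ▸ hs2r).trans (List.sublist_append_right v r))
        exact hbody.trans (List.sublist_append_right u _)
      exact hpre p hpa q hqa hsub'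
    | cons c cs =>
      cases cs with
      | nil =>
        -- second p is X, but X ∉ u ++ v (all < X)
        exfalso
        simp only [List.cons_append, List.nil_append, List.cons.injEq] at hsplit
        obtain ⟨hcp, hXp, _⟩ := hsplit
        subst hcp
        have hmem : p ∈ u ++ v := List.singleton_sublist.mp hs1
        rw [List.mem_append] at hmem
        rcases hmem with hm | hm
        · have := hu p hm; omega
        · have := hv p hm; omega
      | cons c2 cs2 =>
        cases cs2 with
        | nil =>
          -- q = X and [p, p] <+ u ++ v, so p < X = q
          simp only [List.cons_append, List.nil_append, List.cons.injEq] at hsplit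
          obtain ⟨hc1, hc2, hXq, _⟩ := hsplit
          subst hc1; subst hc2
          have hmem : p ∈ u ++ v := hs1.mem (by simp)
          rw [List.mem_append] at hmem
          rcases hmem with hm | hm
          · have := hu p hm; omega
          · have := hv p hm; omega
        | cons c3 cs3 =>
          exfalso
          have := congrArg List.length hsplit
          simp at this

-- one loop step decrements the closed-form count by exactly one
theorem alt_step (u : List Int) (X : Int) (v r : List Int)
    (hch : (u ++ [X]).IsChain (· ≤ ·)) (hu : ∀ z ∈ u, z < X)
    (hv : ∀ z ∈ v, z < X) (hne : v ≠ []) (hr : ∀ z ∈ r.head?, X ≤ z) :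
    simulate_first_sort_alt (u ++ X :: (v ++ r)) =
      simulate_first_sort_alt (u ++ v ++ X :: r) + 1 := by
  induction u with
  | nil =>
    simp only [List.nil_append, simulate_first_sort_alt]
    rw [pvInnerB_run X X v r (le_refl X) hne hv hr, alt_insert X v r hv hr]
    ring
  | cons e u' ih =>
    have hpw := List.isChain_iff_pairwise.mp hch
    have hmem : ∀ z ∈ u' ++ [X], e ≤ z := by
      intro z hz
      exact (List.pairwise_cons.mp (by simpa using hpw)).1 z hz
    simp only [List.cons_append, simulate_first_sort_alt, List.append_assoc]
    have hmove := pvInnerB_move e X e u' v r (le_refl e)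
      (le_of_lt (hu e List.mem_cons_self))
      (fun z hz => hmem z (by simp [hz])) hr
    rw [List.append_assoc] at hmove
    rw [hmove]
    have ih' := ih ((List.isChain_cons.mp (by simpa using hch)).2)
      (fun z hz => hu z (List.mem_cons_of_mem e hz))
    rw [List.append_assoc] at ih'
    rw [ih']
    ring

-- head of dropWhile fails the predicate
theorem pvDropWhile_head (X : Int) (l : List Int) :
    ∀ z ∈ (l.dropWhile (fun z => decide (z < X))).head?, X ≤ z := by
  intro z hz
  cases hd : l.dropWhile (fun z => decide (z < X)) with
  | nil => rw [hd] at hz; simp at hz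
  | cons c cs =>
    rw [hd] at hz
    simp only [List.head?_cons, Option.mem_def, Option.some.injEq] at hz
    have := List.head?_dropWhile_not (fun z => decide (z < X)) l
    rw [hd] at this
    simp at this
    omega

-- the main loop lemma
theorem pvLoopA_eq (fuel : Nat) : ∀ (a : List Int) (m : Int),
    Pre_simulate_first_sort a → simulate_first_sort_alt a < fuel →
    pvLoopA fuel a m = m + simulate_first_sort_alt a := by
  induction fuel with
  | zero =>
    intro a m _ hlt
    have := alt_nonneg a
    simp at hlt
    omega
  | succ f ih =>
    intro a m hpre hlt
    cases hstep : pvStepFind a with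
    | none =>
      simp only [pvLoopA, hstep]
      rw [alt_sorted a (pvStepFind_none a hstep)]
      ring
    | some p =>
      obtain ⟨X, rest⟩ := p
      simp only [pvLoopA, hstep]
      obtain ⟨u, y, w, ha, hrest, hy, hch⟩ := pvStepFind_some a X rest hstep
      have hu : ∀ z ∈ u, z < X := pre_prefix_lt a u X y w hpre ha hy hch
      set v := (y :: w).takeWhile (fun z => decide (z < X)) with hv_def
      set r := (y :: w).dropWhile (fun z => decide (z < X)) with hr_def
      have hvr : v ++ r = y :: w := List.takeWhile_append_dropWhile
      have hv : ∀ z ∈ v, z < X := by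
        intro z hz
        have := List.mem_takeWhile_imp hz
        simpa using this
      have hne : v ≠ [] := by
        rw [hv_def]
        simp [hy]
      have hr : ∀ z ∈ r.head?, X ≤ z := pvDropWhile_head X (y :: w)
      have hins : pvInsertSorted X rest = u ++ v ++ X :: r := by
        rw [hrest, pvInsertSorted_eq,
          pvTakeWhile_app _ u (y :: w) (fun z hz => by simp [hu z hz]),
          pvDropWhile_app _ u (y :: w) (fun z hz => by simp [hu z hz]),
          List.append_assoc]
      have ha' : a = u ++ X :: (v ++ r) := by rw [ha, hvr]
      have hpre' : Pre_simulate_first_sort (u ++ v ++ X :: r) :=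
        pre_preserved u v r X (ha' ▸ hpre) hu hv
      have hdec : simulate_first_sort_alt a = simulate_first_sort_alt (u ++ v ++ X :: r) + 1 := by
        rw [ha']; exact alt_step u X v r hch hu hv hne hr
      have hlt' : simulate_first_sort_alt (u ++ v ++ X :: r) < f := by
        push_cast at hlt ⊢
        omega
      rw [hins, ih (u ++ v ++ X :: r) (m + 1) hpre' hlt', hdec]
      ring

-- ===== VERDICT (by name: the statement is the Claim_ definition above) =====
theorem simulate_first_sort_spec : Claim_equal_simulate_first_sort := by
  intro perm _ hpre
  unfold Spec_simulate_first_sort simulate_first_sort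
  have hle := alt_le_sq perm
  have := pvLoopA_eq (perm.length * perm.length + 1) perm 0 hpre (by push_cast; omega)
  rw [this]
  ring
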